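-- pv_equiv track=rewrite | github.com/wesfggfd/OmniLottie_training | OmniLottie/inference.py | clean_generated_tokens
-- ===== SOURCE A (Python) =====
-- from typing import List, Dict, Set, Optional, Tuple
--
-- LOTTIE_BOS = 192398
--
-- LOTTIE_EOS = 192399
--
-- PAD_TOKEN = 151643
--
-- def clean_generated_tokens(generated_ids: List[int]) -> List[int]:
--     if not generated_ids:
--         return []
--
--     if generated_ids[0] == LOTTIE_BOS:
--         generated_ids = generated_ids[1:]
--
--     if LOTTIE_EOS in generated_ids:
--         eos_idx = generated_ids.index(LOTTIE_EOS)
--         generated_ids = generated_ids[:eos_idx]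
--
--     generated_ids = [t for t in generated_ids if t != PAD_TOKEN]
--
--     return generated_ids
-- ===== SOURCE B (Python) =====
-- LOTTIE_BOS = 192398
-- LOTTIE_EOS = 192399
-- PAD_TOKEN = 151643
--
-- def clean_generated_tokens(generated_ids):
--     out = []
--     start = 1 if generated_ids and generated_ids[0] == LOTTIE_BOS else 0
--     for i in range(start, len(generated_ids)):
--         t = generated_ids[i]
--         if t == LOTTIE_EOS:
--             break
--         if t != PAD_TOKEN:
--             out.append(t)
--     return out
-- ===== Notes on version B (the rewrite author's own statement) =====
-- stated objective: simpler
-- what changed: Replaces the three passes (slice for BOS, membership test + .index + slice for EOS, comprehension for PAD) by a single traversal that breaks at the first EOS and filters PAD on the fly.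
import Mathlib
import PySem

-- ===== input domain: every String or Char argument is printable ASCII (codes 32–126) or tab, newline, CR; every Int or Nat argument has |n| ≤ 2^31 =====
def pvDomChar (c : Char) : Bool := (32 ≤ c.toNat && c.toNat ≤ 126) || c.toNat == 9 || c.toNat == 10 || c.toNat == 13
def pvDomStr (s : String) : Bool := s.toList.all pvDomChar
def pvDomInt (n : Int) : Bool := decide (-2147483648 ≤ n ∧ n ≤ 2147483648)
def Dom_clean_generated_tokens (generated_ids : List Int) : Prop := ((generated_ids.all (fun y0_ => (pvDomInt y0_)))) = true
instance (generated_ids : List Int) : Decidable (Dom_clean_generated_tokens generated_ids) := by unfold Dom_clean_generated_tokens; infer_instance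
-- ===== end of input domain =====

-- B fuses A's three passes (BOS slice, EOS membership+index+slice, PAD comprehension)
-- into one traversal that stops at the first EOS; objective: simpler.

-- ===== PORT A =====
def clean_generated_tokens (generated_ids : List Int) : List Int :=
  if generated_ids = [] then []
  else
    let g1 := if PySem.List.pyGet? generated_ids 0 = some 192398
              then PySem.List.slice generated_ids (some 1) none
              else generated_ids
    let g2 := if (192399 : Int) ∈ g1 then
                match PySem.List.index? g1 192399 with
                | some i => PySem.List.slice g1 none (some (i : Int))
                | none => g1
              else g1
    g2.filter (fun t => decide (t ≠ 151643))

-- ===== PORT B =====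
-- the single-pass loop of Source B: break at EOS, skip PAD, keep the rest
def pvScan : List Int → List Int
  | [] => []
  | t :: rest =>
    if t = 192399 then []
    else if t = 151643 then pvScan rest
    else t :: pvScan rest

def clean_generated_tokens_alt (generated_ids : List Int) : List Int :=
  let start : Nat :=
    match generated_ids with
    | t :: _ => if t = 192398 then 1 else 0
    | [] => 0
  pvScan (generated_ids.drop start)

-- ===== PRECONDITION & SPEC =====
def Spec_clean_generated_tokens (generated_ids : List Int) (out : List Int) : Prop := out = clean_generated_tokens_alt generated_ids
instance (generated_ids : List Int) (out : List Int) : Decidable (Spec_clean_generated_tokens generated_ids out) := by unfold Spec_clean_generated_tokens; infer_instance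

-- ===== CLAIM (what is proved, stated in full; the proofs are below) =====
def Claim_equal_clean_generated_tokens : Prop := ∀ (generated_ids : List Int), Dom_clean_generated_tokens generated_ids → Spec_clean_generated_tokens generated_ids (clean_generated_tokens generated_ids)

-- ===== LEMMAS AND PROOFS =====

-- A's EOS-truncate-then-PAD-filter pipeline equals one pvScan pass
theorem trunc_filter (l : List Int) :
    (if (192399 : Int) ∈ l then
        match PySem.List.index? l 192399 with
        | some i => PySem.List.slice l none (some (i : Int))
        | none => l
      else l).filter (fun t => decide (t ≠ 151643)) = pvScan l := by
  induction l with
  | nil => simp [pvScan]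
  | cons x xs ih =>
    by_cases hx : x = (192399 : Int)
    · subst hx
      rw [if_pos (List.mem_cons_self)]
      rw [PySem.List.index?_cons_self]
      simp [PySem.List.slice, pvScan]
    · by_cases hm : (192399 : Int) ∈ xs
      · rw [if_pos (List.mem_cons_of_mem _ hm)]
        obtain ⟨i, hi⟩ := Option.isSome_iff_exists.mp ((PySem.List.index?_isSome_iff xs 192399).mpr hm)
        have ih0 : (PySem.List.slice xs none (some (i : Int))).filter
            (fun t => decide (t ≠ 151643)) = pvScan xs := by
          rw [if_pos hm, hi] at ih; exact ih
        rw [PySem.List.slice_to_natCast] at ih0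
        rw [PySem.List.index?_cons_of_ne xs hx, hi]
        show (PySem.List.slice (x :: xs) none (some ((i + 1 : Nat) : Int))).filter
            (fun t => decide (t ≠ 151643)) = pvScan (x :: xs)
        rw [PySem.List.slice_to_natCast]
        simp only [List.take_succ_cons, List.filter_cons, pvScan, if_neg hx]
        by_cases hp : x = (151643 : Int) <;> simp [hp] <;> simpa using ih0
      · have ih' : xs.filter (fun t => decide (t ≠ 151643)) = pvScan xs := by
          rw [if_neg hm] at ih; exact ih
        rw [if_neg (by simp [hm, Ne.symm hx])]
        simp only [List.filter_cons, pvScan, if_neg hx]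
        by_cases hp : x = (151643 : Int) <;> simp [hp] <;> simpa using ih'

theorem clean_eq (generated_ids : List Int) :
    clean_generated_tokens generated_ids = clean_generated_tokens_alt generated_ids := by
  unfold clean_generated_tokens clean_generated_tokens_alt
  cases generated_ids with
  | nil => simp [pvScan]
  | cons x xs =>
    simp only [reduceCtorEq, if_false, PySem.List.pyGet?_zero_cons, Option.some.injEq]
    by_cases hb : x = (192398 : Int)
    · rw [if_pos hb, PySem.List.slice_from_one]
      simpa [hb] using trunc_filter xs
    · rw [if_neg hb]
      simpa [hb] using trunc_filter (x :: xs)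

-- ===== VERDICT (by name: the statement is the Claim_ definition above) =====
theorem clean_generated_tokens_spec : Claim_equal_clean_generated_tokens := by
  intro g _
  exact clean_eq g
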